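-- pv_equiv track=rewrite | github.com/Kipwisp/advent-of-code-2020 | day_19/day_19.py | part_1
-- ===== SOURCE A (Python) =====
-- def dfs(rule, rules, memo):
--     memo[rule] = set()
--     for option in rules[rule]:
--         results = set([''])
--         for subrule in option.split(' '):
--             if subrule.isalpha():
--                 new = set()
--                 for result in results:
--                     new.add(result + subrule)
--                 results = new
--             else:
--                 if subrule not in memo:
--                     dfs(subrule, rules, memo)
--
--                 new = set()
--                 for string in memo[subrule]:
--                     for result in results:
--                         new.add(result + string)
--                 results = new
--
--         memo[rule].update(results)
--
-- def part_1(rules, messages):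
--     memo = {}
--
--     dfs('0', rules, memo)
--
--     match = 0
--     for message in messages:
--         if message in memo['0']:
--             match += 1
--     return match, memo
-- ===== SOURCE B (Python) =====
-- def part_1(rules, messages):
--     # Explicit-stack machine instead of recursion: frames resume the per-option
--     # token fold; a ('wait', ...) frame combines with the sub-rule's language
--     # once the pushed sub-rule frame has finished.
--     memo = {'0': set()}
--     opts = rules['0']
--     stack = [('norm', '0', {''}, opts[0].split(' '), opts[1:])] if opts else []
--     while stack:
--         frame = stack.pop()
--         if frame[0] == 'norm':
--             _, rule, results, toks, opts = frame
--             if toks: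
--                 tok, rest = toks[0], toks[1:]
--                 if tok.isalpha():
--                     stack.append(('norm', rule, {r + tok for r in results}, rest, opts))
--                 elif tok in memo:
--                     stack.append(('norm', rule,
--                                   {r + s for s in memo[tok] for r in results}, rest, opts))
--                 else:
--                     memo[tok] = set()
--                     sub = rules[tok]
--                     stack.append(('wait', rule, results, tok, rest, opts))
--                     if sub:
--                         stack.append(('norm', tok, {''}, sub[0].split(' '), sub[1:]))
--             else:
--                 memo[rule] |= results
--                 if opts:
--                     stack.append(('norm', rule, {''}, opts[0].split(' '), opts[1:]))
--         else:
--             _, rule, results, tok, rest, opts = frame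
--             stack.append(('norm', rule,
--                           {r + s for s in memo[tok] for r in results}, rest, opts))
--     match = sum(1 for m in messages if m in memo['0'])
--     return match, memo
-- ===== Notes on version B (the rewrite author's own statement) =====
-- stated objective: alternative
-- what changed: A's memoised recursion over the grammar (dfs with an implicit call stack) is replaced by an explicit-stack frame machine: a while loop pops frames that resume the per-option token fold, pushing a wait-frame plus a sub-rule frame when an unvisited rule reference is met; the match count is a sum over a generator instead of a counting loop.
import Mathlib
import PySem

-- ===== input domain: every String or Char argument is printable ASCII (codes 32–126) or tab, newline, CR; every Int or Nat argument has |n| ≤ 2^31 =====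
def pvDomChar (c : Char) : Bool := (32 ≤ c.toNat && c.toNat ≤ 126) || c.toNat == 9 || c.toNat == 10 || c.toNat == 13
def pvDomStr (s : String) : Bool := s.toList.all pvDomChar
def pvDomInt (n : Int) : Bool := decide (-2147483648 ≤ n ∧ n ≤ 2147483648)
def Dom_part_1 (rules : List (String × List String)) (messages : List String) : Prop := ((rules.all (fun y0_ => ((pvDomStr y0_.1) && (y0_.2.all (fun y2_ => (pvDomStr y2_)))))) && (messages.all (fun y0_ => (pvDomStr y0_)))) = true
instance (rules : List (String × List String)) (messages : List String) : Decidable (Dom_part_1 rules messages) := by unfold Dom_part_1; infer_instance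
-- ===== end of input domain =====

-- B replaces A's memoised recursion by an explicit-stack frame machine over the same
-- grammar (same return value, same memo); objective: alternative decomposition, not speed.

-- shared small helpers (each corresponds to one Python construct both sources contain)
def splitSp (s : String) : List String := (PySem.Str.split? s " ").getD []

-- new = set(); for r in results: new.add(r + t)
def appendTok (results : PySem.Set String) (t : String) : PySem.Set String :=
  results.foldl (fun new r => PySem.Set.add new (r ++ t)) PySem.Set.empty

-- new = set(); for s in sub: for r in results: new.add(r + s)
def combineSets (sub results : PySem.Set String) : PySem.Set String :=
  sub.foldl (fun new s => results.foldl (fun new r => PySem.Set.add new (r ++ s)) new)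
    PySem.Set.empty

abbrev PvMemo := PySem.Dict String (PySem.Set String)

-- fuel bound used by both ports as a totality guard: the nesting depth of dfs calls is
-- at most 1 + (number of tokens appearing in rule options), so this fuel never runs out
def fuelOf (rd : PySem.Dict String (List String)) : Nat :=
  (rd.items.foldl (fun n p => p.2.foldl (fun n o => n + (splitSp o).length) n) 0) + 2

-- ===== PORT A =====
mutual
-- def dfs(rule, rules, memo): memo[rule] = set(); for option in rules[rule]: …
def dfsA (rd : PySem.Dict String (List String)) : Nat → String → PvMemo → PvMemo
  | 0, _, memo => memo
  | f + 1, rule, memo =>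
      goOptsA rd f rule (rd.getD rule []) (memo.insert rule PySem.Set.empty)
termination_by f _ _ => (f, 0, 0)

-- for option in rules[rule]: results = set(['']); … ; memo[rule].update(results)
def goOptsA (rd : PySem.Dict String (List String)) :
    Nat → String → List String → PvMemo → PvMemo
  | _, _, [], memo => memo
  | f, rule, o :: os, memo =>
      let p := goToksA rd f (PySem.Set.ofList [""]) (splitSp o) memo
      goOptsA rd f rule os
        (p.2.modify rule PySem.Set.empty (fun s => PySem.Set.update s p.1))
termination_by f _ os _ => (f, 2, os.length)

-- for subrule in option.split(' '): …
def goToksA (rd : PySem.Dict String (List String)) :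
    Nat → PySem.Set String → List String → PvMemo → PySem.Set String × PvMemo
  | _, results, [], memo => (results, memo)
  | f, results, t :: ts, memo =>
      if PySem.Str.strIsalpha t then goToksA rd f (appendTok results t) ts memo
      else
        let memo' := if memo.contains t then memo else dfsA rd f t memo
        goToksA rd f (combineSets (memo'.getD t PySem.Set.empty) results) ts memo'
termination_by f _ ts _ => (f, 1, ts.length)
end

def part_1 (rules : List (String × List String)) (messages : List String) :
    Int × (List (String × List String)) :=
  let rd := PySem.Dict.ofList rules
  let memo := dfsA rd (fuelOf rd) "0" PySem.Dict.empty
  (messages.foldl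
      (fun acc m => if (memo.getD "0" PySem.Set.empty).contains m then acc + 1 else acc)
      (0 : Int),
    memo.items)

-- ===== PORT B =====
-- frames of B's explicit stack: 'norm' is a paused per-option token fold, 'wait'
-- resumes the fold with the language of sub-rule tok once that sub-rule is finished
inductive PvFrame where
  | norm (fuel : Nat) (rule : String) (results : PySem.Set String)
      (toks : List String) (opts : List String)
  | wait (fuel : Nat) (rule : String) (results : PySem.Set String)
      (tok : String) (toks : List String) (opts : List String)

-- termination weights for the machine (proof artefacts of the while-loop's totality)
def optsW (opts : List String) : Nat := (opts.map (fun o => 2 * (splitSp o).length + 1)).sum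

def frameW (K : Nat) : PvFrame → Nat
  | .norm f _ _ toks opts => (2 * toks.length + optsW opts + 2) * K ^ f
  | .wait f _ _ _ ts opts => (2 * ts.length + optsW opts + 3) * K ^ f

def stackW (K : Nat) (S : List PvFrame) : Nat := (S.map (frameW K)).sum

def kOf (rd : PySem.Dict String (List String)) : Nat :=
  (rd.items.map (fun p => optsW p.2)).sum + 3

lemma optsW_getD_le (rd : PySem.Dict String (List String)) (t : String) :
    optsW (rd.getD t []) ≤ (rd.items.map (fun p => optsW p.2)).sum := by
  rw [PySem.Dict.getD_eq_get?_getD]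
  cases h : rd.get? t with
  | none => simp [optsW]
  | some v =>
      have hv : (t, v) ∈ rd.items := PySem.Dict.mem_items_of_get?_eq_some rd h
      have : optsW v ∈ rd.items.map (fun p => optsW p.2) :=
        List.mem_map.mpr ⟨(t, v), hv, rfl⟩
      simpa using List.single_le_sum (fun x _ => Nat.zero_le x) _ this

lemma stackW_cons (K : Nat) (a : PvFrame) (S : List PvFrame) :
    stackW K (a :: S) = frameW K a + stackW K S := by simp [stackW]

lemma pv_mul_pow_lt {K a b : Nat} (hK : 0 < K) (h : a < b) (f : Nat) :
    a * K ^ f < b * K ^ f :=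
  Nat.mul_lt_mul_of_lt_of_le h (Nat.le_refl _) (Nat.pow_pos hK)

lemma pv_step_lt {K a b : Nat} (hK : 0 < K) (h : a < b) (f W : Nat) :
    a * K ^ f + W < b * K ^ f + W :=
  Nat.add_lt_add_right (pv_mul_pow_lt hK h f) W

lemma pv_pop_lt {K c : Nat} (hK : 0 < K) (hc : 0 < c) (f W : Nat) :
    W < c * K ^ f + W := by
  have h1 : 0 < K ^ f := Nat.pow_pos hK
  have := Nat.mul_pos hc h1
  omega

lemma optsW_cons (o : String) (os : List String) :
    optsW (o :: os) = 2 * (splitSp o).length + 1 + optsW os := by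
  simp [optsW]

-- the machine: pop a frame, do one step of the paused fold, push the continuations
def runB (rd : PySem.Dict String (List String)) : List PvFrame → PvMemo → PvMemo
  | [], memo => memo
  | .norm _ rule results [] [] :: S, memo =>
      runB rd S (memo.modify rule PySem.Set.empty (fun s => PySem.Set.update s results))
  | .norm f rule results [] (o :: os) :: S, memo =>
      runB rd (.norm f rule (PySem.Set.ofList [""]) (splitSp o) os :: S)
        (memo.modify rule PySem.Set.empty (fun s => PySem.Set.update s results))
  | .norm f rule results (t :: ts) opts :: S, memo =>
      if PySem.Str.strIsalpha t then
        runB rd (.norm f rule (appendTok results t) ts opts :: S) memo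
      else if memo.contains t then
        runB rd (.norm f rule (combineSets (memo.getD t PySem.Set.empty) results) ts opts :: S)
          memo
      else
        match f with
        | 0 =>
            runB rd (.norm 0 rule (combineSets PySem.Set.empty results) ts opts :: S) memo
        | f' + 1 =>
            let memo1 := memo.insert t PySem.Set.empty
            match hsub : rd.getD t [] with
            | [] => runB rd (.wait (f' + 1) rule results t ts opts :: S) memo1
            | o :: os =>
                runB rd
                  (.norm f' t (PySem.Set.ofList [""]) (splitSp o) os
                    :: .wait (f' + 1) rule results t ts opts :: S) memo1
  | .wait f rule results t ts opts :: S, memo =>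
      runB rd (.norm f rule (combineSets (memo.getD t PySem.Set.empty) results) ts opts :: S)
        memo
termination_by S _ => stackW (kOf rd) S
decreasing_by
  all_goals simp only [stackW_cons, frameW, List.length_cons, List.length_nil,
    Nat.succ_eq_add_one]
  all_goals have hK : 0 < kOf rd := by unfold kOf; omega
  all_goals first
    | exact pv_pop_lt hK (by simp [optsW]) _ _
    | (apply pv_step_lt hK; omega)
    | (apply pv_step_lt hK; simp only [optsW_cons]; omega)
    | (have h1 := optsW_getD_le rd t
       rw [hsub, optsW_cons] at h1
       have hC : 2 * (splitSp o).length + optsW os + 2 < kOf rd := by unfold kOf; omega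
       have h2 : (2 * (splitSp o).length + optsW os + 2) * kOf rd ^ f' < kOf rd ^ (f' + 1) := by
         calc (2 * (splitSp o).length + optsW os + 2) * kOf rd ^ f'
             < kOf rd * kOf rd ^ f' := pv_mul_pow_lt hK hC f'
           _ = kOf rd ^ (f' + 1) := by rw [pow_succ]; exact Nat.mul_comm _ _
       have e : (2 * (ts.length + 1) + optsW opts + 2) * kOf rd ^ (f' + 1)
           = kOf rd ^ (f' + 1) + (2 * ts.length + optsW opts + 3) * kOf rd ^ (f' + 1) := by
         ring
       rw [e]
       omega)

def part_1_alt (rules : List (String × List String)) (messages : List String) :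
    Int × (List (String × List String)) :=
  let rd := PySem.Dict.ofList rules
  let memo0 : PvMemo := PySem.Dict.empty.insert "0" PySem.Set.empty
  let memo :=
    match rd.getD "0" [] with
    | [] => memo0
    | o :: os =>
        runB rd [.norm (fuelOf rd - 1) "0" (PySem.Set.ofList [""]) (splitSp o) os] memo0
  ((messages.countP (fun m => (memo.getD "0" PySem.Set.empty).contains m) : Int), memo.items)

-- ===== PRECONDITION & SPEC =====
-- Pre_part_1 is exactly A's normal-return domain: every grammar reference reachable from
-- rule '0' (non-alphabetic tokens of options of reachable rules) must itself be a rule;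
-- on a dangling reachable reference the Python raises KeyError.
def pvRefs (opts : List String) : List String :=
  (opts.flatMap splitSp).filter (fun t => !PySem.Str.strIsalpha t)

def pvReachStep (rd : PySem.Dict String (List String)) (seen : List String) : List String :=
  PySem.Set.update (PySem.Set.ofList seen)
    ((rd.items.filter (fun p => seen.contains p.1)).flatMap (fun p => pvRefs p.2))

def pvReach (rd : PySem.Dict String (List String)) : Nat → List String → List String
  | 0, seen => seen
  | n + 1, seen => pvReach rd n (pvReachStep rd seen)

def Pre_part_1 (rules : List (String × List String)) (messages : List String) : Prop :=
  (pvReach (PySem.Dict.ofList rules) (fuelOf (PySem.Dict.ofList rules)) ["0"]).all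
      (fun t => (PySem.Dict.ofList rules).contains t) = true
instance (rules : List (String × List String)) (messages : List String) :
    Decidable (Pre_part_1 rules messages) := by unfold Pre_part_1; infer_instance

def pvWitness_part_1 : (List (String × List String)) × List String :=
  ([("0", ["a b", "a 1"]), ("1", ["b"])], ["ab", "b", "ba"])

def Spec_part_1 (rules : List (String × List String)) (messages : List String) (out : Int × (List (String × List String))) : Prop := out = part_1_alt rules messages
instance (rules : List (String × List String)) (messages : List String) (out : Int × (List (String × List String))) : Decidable (Spec_part_1 rules messages out) := by unfold Spec_part_1; infer_instance

-- ===== CLAIM (what is proved, stated in full; the proofs are below) =====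
def Claim_equal_part_1 : Prop := ∀ (rules : List (String × List String)) (messages : List String), Dom_part_1 rules messages → Pre_part_1 rules messages → Spec_part_1 rules messages (part_1 rules messages)

-- ===== LEMMAS AND PROOFS =====

-- what a frame means in terms of A's recursion: finish the paused token fold, store the
-- option's results into memo[rule], then run the remaining options
def frameSem (rd : PySem.Dict String (List String)) : PvFrame → PvMemo → PvMemo
  | .norm f rule results toks opts, memo =>
      let p := goToksA rd f results toks memo
      goOptsA rd f rule opts
        (p.2.modify rule PySem.Set.empty (fun s => PySem.Set.update s p.1))
  | .wait f rule results t ts opts, memo =>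
      let p := goToksA rd f (combineSets (memo.getD t PySem.Set.empty) results) ts memo
      goOptsA rd f rule opts
        (p.2.modify rule PySem.Set.empty (fun s => PySem.Set.update s p.1))

-- single-step unfolding lemmas for the two programs (their defining equations)
lemma dfsA_succ (rd : PySem.Dict String (List String)) (f : Nat) (rule : String)
    (memo : PvMemo) :
    dfsA rd (f + 1) rule memo
      = goOptsA rd f rule (rd.getD rule []) (memo.insert rule PySem.Set.empty) := by
  rw [dfsA.eq_def]

lemma goOptsA_cons (rd : PySem.Dict String (List String)) (f : Nat) (rule o : String)
    (os : List String) (memo : PvMemo) :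
    goOptsA rd f rule (o :: os) memo
      = (let p := goToksA rd f (PySem.Set.ofList [""]) (splitSp o) memo
         goOptsA rd f rule os
           (p.2.modify rule PySem.Set.empty (fun s => PySem.Set.update s p.1))) := by
  rw [goOptsA.eq_def]

lemma goToksA_alpha (rd : PySem.Dict String (List String)) (f : Nat) (t : String)
    (ts : List String) (results : PySem.Set String) (memo : PvMemo)
    (ha : PySem.Chars.strIsalpha t.toList = true) :
    goToksA rd f results (t :: ts) memo = goToksA rd f (appendTok results t) ts memo := by
  rw [goToksA.eq_def]; simp [ha]

lemma goToksA_seen (rd : PySem.Dict String (List String)) (f : Nat) (t : String)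
    (ts : List String) (results : PySem.Set String) (memo : PvMemo)
    (ha : PySem.Chars.strIsalpha t.toList = false) (hc : PySem.Dict.contains memo t = true) :
    goToksA rd f results (t :: ts) memo
      = goToksA rd f (combineSets (PySem.Dict.getD memo t PySem.Set.empty) results) ts memo := by
  rw [goToksA.eq_def]; simp [ha, hc]

lemma goToksA_unseen (rd : PySem.Dict String (List String)) (f : Nat) (t : String)
    (ts : List String) (results : PySem.Set String) (memo : PvMemo)
    (ha : PySem.Chars.strIsalpha t.toList = false) (hc : PySem.Dict.contains memo t = false) :
    goToksA rd f results (t :: ts) memo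
      = goToksA rd f
          (combineSets (PySem.Dict.getD (dfsA rd f t memo) t PySem.Set.empty) results) ts
          (dfsA rd f t memo) := by
  rw [goToksA.eq_def]; simp [ha, hc]

-- single machine steps of B (defining equations of runB)
lemma runB_alpha (rd : PySem.Dict String (List String)) (f : Nat) (rule t : String)
    (ts opts : List String) (results : PySem.Set String) (S : List PvFrame) (memo : PvMemo)
    (ha : PySem.Chars.strIsalpha t.toList = true) :
    runB rd (.norm f rule results (t :: ts) opts :: S) memo
      = runB rd (.norm f rule (appendTok results t) ts opts :: S) memo := by
  rw [runB.eq_def]; simp [ha]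

lemma runB_seen (rd : PySem.Dict String (List String)) (f : Nat) (rule t : String)
    (ts opts : List String) (results : PySem.Set String) (S : List PvFrame) (memo : PvMemo)
    (ha : PySem.Chars.strIsalpha t.toList = false) (hc : PySem.Dict.contains memo t = true) :
    runB rd (.norm f rule results (t :: ts) opts :: S) memo
      = runB rd (.norm f rule (combineSets (PySem.Dict.getD memo t PySem.Set.empty) results)
          ts opts :: S) memo := by
  rw [runB.eq_def]; simp [ha, hc]

lemma runB_zero (rd : PySem.Dict String (List String)) (rule t : String)
    (ts opts : List String) (results : PySem.Set String) (S : List PvFrame) (memo : PvMemo)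
    (ha : PySem.Chars.strIsalpha t.toList = false) (hc : PySem.Dict.contains memo t = false) :
    runB rd (.norm 0 rule results (t :: ts) opts :: S) memo
      = runB rd (.norm 0 rule (combineSets PySem.Set.empty results) ts opts :: S) memo := by
  rw [runB.eq_def]; simp [ha, hc]

lemma runB_push_nil (rd : PySem.Dict String (List String)) (f' : Nat) (rule t : String)
    (ts opts : List String) (results : PySem.Set String) (S : List PvFrame) (memo : PvMemo)
    (ha : PySem.Chars.strIsalpha t.toList = false) (hc : PySem.Dict.contains memo t = false)
    (hsub : rd.getD t [] = []) :
    runB rd (.norm (f' + 1) rule results (t :: ts) opts :: S) memo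
      = runB rd (.wait (f' + 1) rule results t ts opts :: S)
          (PySem.Dict.insert memo t PySem.Set.empty) := by
  rw [runB.eq_def]; simp [ha, hc]
  split
  · rfl
  · rename_i o os heq
    rw [hsub] at heq
    cases heq

lemma runB_push_cons (rd : PySem.Dict String (List String)) (f' : Nat) (o : String)
    (os : List String) (rule t : String) (ts opts : List String) (results : PySem.Set String)
    (S : List PvFrame) (memo : PvMemo)
    (ha : PySem.Chars.strIsalpha t.toList = false) (hc : PySem.Dict.contains memo t = false)
    (hsub : rd.getD t [] = o :: os) :
    runB rd (.norm (f' + 1) rule results (t :: ts) opts :: S) memo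
      = runB rd (.norm f' t (PySem.Set.ofList [""]) (splitSp o) os
            :: .wait (f' + 1) rule results t ts opts :: S)
          (PySem.Dict.insert memo t PySem.Set.empty) := by
  rw [runB.eq_def]; simp [ha, hc]
  split
  · rename_i heq
    rw [hsub] at heq
    cases heq
  · rename_i o' os' heq
    rw [hsub] at heq
    cases heq
    rfl

lemma runB_wait (rd : PySem.Dict String (List String)) (f : Nat) (rule t : String)
    (ts opts : List String) (results : PySem.Set String) (S : List PvFrame) (memo : PvMemo) :
    runB rd (.wait f rule results t ts opts :: S) memo
      = runB rd (.norm f rule (combineSets (PySem.Dict.getD memo t PySem.Set.empty) results)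
          ts opts :: S) memo := by
  rw [runB.eq_def]

lemma runB_adv (rd : PySem.Dict String (List String)) (f : Nat) (rule o : String)
    (os : List String) (results : PySem.Set String) (S : List PvFrame) (memo : PvMemo) :
    runB rd (.norm f rule results [] (o :: os) :: S) memo
      = runB rd (.norm f rule (PySem.Set.ofList [""]) (splitSp o) os :: S)
          (memo.modify rule PySem.Set.empty (fun s => PySem.Set.update s results)) := by
  rw [runB.eq_def]

lemma runB_pop (rd : PySem.Dict String (List String)) (f : Nat) (rule : String)
    (results : PySem.Set String) (S : List PvFrame) (memo : PvMemo) :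
    runB rd (.norm f rule results [] [] :: S) memo
      = runB rd S (memo.modify rule PySem.Set.empty (fun s => PySem.Set.update s results)) := by
  rw [runB.eq_def]

-- the machine faithfully completes A's paused computation, frame by frame
theorem runB_norm (rd : PySem.Dict String (List String)) :
    ∀ (f : Nat) (opts toks : List String) (rule : String) (results : PySem.Set String)
      (S : List PvFrame) (memo : PvMemo),
      runB rd (.norm f rule results toks opts :: S) memo
        = runB rd S (frameSem rd (.norm f rule results toks opts) memo) := by
  intro f
  induction f using Nat.strong_induction_on with
  | _ f ihf =>
  intro opts
  induction opts with
  | nil =>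
      intro toks
      induction toks with
      | nil =>
          intro rule results S memo
          rw [runB_pop]
          simp only [frameSem, goToksA, goOptsA]
      | cons t ts ihts =>
          intro rule results S memo
          by_cases ha : PySem.Chars.strIsalpha t.toList = true
          · rw [runB_alpha rd f rule t ts _ results S memo ha, ihts]
            simp only [frameSem, goToksA_alpha rd f t ts results memo ha]
          · rw [Bool.not_eq_true] at ha
            by_cases hc : PySem.Dict.contains memo t = true
            · rw [runB_seen rd f rule t ts _ results S memo ha hc, ihts]
              simp only [frameSem, goToksA_seen rd f t ts results memo ha hc]
            · rw [Bool.not_eq_true] at hc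
              cases f with
              | zero =>
                  rw [runB_zero rd rule t ts _ results S memo ha hc, ihts]
                  simp only [frameSem, goToksA_unseen rd 0 t ts results memo ha hc, dfsA,
                    PySem.Dict.getD_of_not_contains _ _ hc]
              | succ f' =>
                  cases hsub : rd.getD t [] with
                  | nil =>
                      rw [runB_push_nil rd f' rule t ts _ results S memo ha hc hsub,
                        runB_wait, PySem.Dict.getD_insert_self, ihts]
                      simp only [frameSem,
                        goToksA_unseen rd (f' + 1) t ts results memo ha hc,
                        dfsA_succ, hsub, goOptsA, PySem.Dict.getD_insert_self]
                  | cons o' os' =>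
                      rw [runB_push_cons rd f' o' os' rule t ts _ results S memo ha hc hsub,
                        ihf f' (by omega), runB_wait, ihts]
                      simp only [frameSem,
                        goToksA_unseen rd (f' + 1) t ts results memo ha hc,
                        dfsA_succ, hsub, goOptsA_cons]
  | cons o os ihos =>
      intro toks
      induction toks with
      | nil =>
          intro rule results S memo
          rw [runB_adv, ihos]
          simp only [frameSem, goToksA, goOptsA_cons]
      | cons t ts ihts =>
          intro rule results S memo
          by_cases ha : PySem.Chars.strIsalpha t.toList = true
          · rw [runB_alpha rd f rule t ts _ results S memo ha, ihts]
            simp only [frameSem, goToksA_alpha rd f t ts results memo ha]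
          · rw [Bool.not_eq_true] at ha
            by_cases hc : PySem.Dict.contains memo t = true
            · rw [runB_seen rd f rule t ts _ results S memo ha hc, ihts]
              simp only [frameSem, goToksA_seen rd f t ts results memo ha hc]
            · rw [Bool.not_eq_true] at hc
              cases f with
              | zero =>
                  rw [runB_zero rd rule t ts _ results S memo ha hc, ihts]
                  simp only [frameSem, goToksA_unseen rd 0 t ts results memo ha hc, dfsA,
                    PySem.Dict.getD_of_not_contains _ _ hc]
              | succ f' =>
                  cases hsub : rd.getD t [] with
                  | nil =>
                      rw [runB_push_nil rd f' rule t ts _ results S memo ha hc hsub,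
                        runB_wait, PySem.Dict.getD_insert_self, ihts]
                      simp only [frameSem,
                        goToksA_unseen rd (f' + 1) t ts results memo ha hc,
                        dfsA_succ, hsub, goOptsA, PySem.Dict.getD_insert_self]
                  | cons o' os' =>
                      rw [runB_push_cons rd f' o' os' rule t ts _ results S memo ha hc hsub,
                        ihf f' (by omega), runB_wait, ihts]
                      simp only [frameSem,
                        goToksA_unseen rd (f' + 1) t ts results memo ha hc,
                        dfsA_succ, hsub, goOptsA_cons]

lemma runB_nil (rd : PySem.Dict String (List String)) (memo : PvMemo) :
    runB rd [] memo = memo := by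
  rw [runB.eq_def]

-- the two ports build the same memo dictionary
lemma memo_eq (rd : PySem.Dict String (List String)) :
    dfsA rd (fuelOf rd) "0" PySem.Dict.empty
      = (match rd.getD "0" [] with
         | [] => PySem.Dict.empty.insert "0" PySem.Set.empty
         | o :: os =>
             runB rd [.norm (fuelOf rd - 1) "0" (PySem.Set.ofList [""]) (splitSp o) os]
               (PySem.Dict.empty.insert "0" PySem.Set.empty)) := by
  obtain ⟨n, hn⟩ : ∃ n, fuelOf rd = n + 1 := ⟨fuelOf rd - 1, by unfold fuelOf; omega⟩
  rw [hn, Nat.add_sub_cancel, dfsA_succ]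
  cases hsub : rd.getD "0" [] with
  | nil => simp only [goOptsA]
  | cons o os =>
      have hred : (match o :: os with
          | ([] : List String) => PySem.Dict.empty.insert "0" PySem.Set.empty
          | o :: os =>
              runB rd [.norm n "0" (PySem.Set.ofList [""]) (splitSp o) os]
                (PySem.Dict.empty.insert "0" PySem.Set.empty))
          = runB rd [.norm n "0" (PySem.Set.ofList [""]) (splitSp o) os]
              (PySem.Dict.empty.insert "0" PySem.Set.empty) := rfl
      rw [hred, goOptsA_cons, runB_norm, runB_nil]
      simp only [frameSem]

theorem part_1_spec : Claim_equal_part_1 := by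
  unfold Claim_equal_part_1
  intro rules messages _ _
  unfold Spec_part_1 part_1 part_1_alt
  simp only [memo_eq]
  refine Prod.ext ?_ rfl
  simp only [PySem.List.foldl_count_if]
  simp only [zero_add]
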